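-- pv_equiv track=rewrite | github.com/Ev3NN/ICT_P2 | lz77.py | compute_codeword
-- ===== SOURCE A (Python) =====
-- L = 3
--
-- def compute_codeword(s_buffer, la_buffer):
--     """
--     Finds the longest prefix in la_buffer that begins in s_buffer,
--     and computes the appropriate codeword (d, l, c)
--
--     Parameters
--     ----------
--     s_buffer: str
--         Search buffer containing the past occurrences of
--         the message.
--     la_buffer: str
--         Look-Ahead Buffer containing (a part of) the message
--         to encode.
--     """
--     prefix = la_buffer[0]
--     codeword = [0, 0, prefix]
--
--     while (idx := s_buffer.rfind(prefix)) != -1: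
--         d = L - idx
--         l = len(prefix)
--
--         if len(prefix) < len(la_buffer):
--             c = la_buffer[l]
--             codeword = [d, l, c]
--             prefix = la_buffer[0:l+1]
--         else:
--             c = ''
--             codeword = [d, l, c]
--             break
--
--     return tuple(codeword)
-- ===== SOURCE B (Python) =====
-- L = 3
--
-- def compute_codeword(s_buffer, la_buffer):
--     c0 = la_buffer[0]
--     m = len(la_buffer)
--     # binary search for the largest k <= m such that la_buffer[:k] occurs in s_buffer
--     # (the set of such k is downward closed; k = 0 always qualifies)
--     lo, hi = 0, m
--     while lo < hi:
--         mid = (lo + hi + 1) // 2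
--         if la_buffer[:mid] in s_buffer:
--             lo = mid
--         else:
--             hi = mid - 1
--     k = lo
--     if k == 0:
--         return (0, 0, c0)
--     d = L - s_buffer.rfind(la_buffer[:k])
--     return (d, k, la_buffer[k] if k < m else '')
-- ===== Notes on version B (the rewrite author's own statement) =====
-- stated objective: faster
-- what changed: Replaces A's grow-the-prefix loop (one rfind scan per prefix length, up to match-length many scans) by a binary search on the prefix length (O(log m) substring tests) followed by a single rfind of the best prefix, with the rightmost occurrence and the c='' full-match boundary preserved.
import Mathlib
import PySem

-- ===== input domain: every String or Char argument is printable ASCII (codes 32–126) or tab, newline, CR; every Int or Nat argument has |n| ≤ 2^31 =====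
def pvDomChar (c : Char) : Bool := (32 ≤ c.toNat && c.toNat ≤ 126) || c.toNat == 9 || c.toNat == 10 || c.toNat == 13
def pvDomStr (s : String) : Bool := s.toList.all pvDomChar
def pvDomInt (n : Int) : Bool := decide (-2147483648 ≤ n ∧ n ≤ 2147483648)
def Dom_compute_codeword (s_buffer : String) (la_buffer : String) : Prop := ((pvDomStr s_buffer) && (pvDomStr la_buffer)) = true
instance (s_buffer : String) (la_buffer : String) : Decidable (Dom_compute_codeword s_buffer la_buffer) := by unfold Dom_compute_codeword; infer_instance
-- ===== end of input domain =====

-- B replaces A's grow-the-prefix loop (one rfind scan per prefix length) by a binary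
-- search on the prefix length plus one rfind of the best prefix (objective: faster).

-- ===== PORT A =====
-- A's while loop: prefix grows by one char each iteration; recursion on the remaining length.
def pvGoA (s la pre : List Char) (cw : Int × Int × List Char) : Int × Int × List Char :=
  let idx := PySem.Chars.rfind s pre
  if idx = -1 then cw
  else if h : pre.length < la.length then
    pvGoA s la (la.take (pre.length + 1))
      (3 - idx, (pre.length : Int), [la.getD pre.length 'a'])  -- la[l], guarded in range by h
  else (3 - idx, (pre.length : Int), [])
termination_by la.length - pre.length
decreasing_by simp [List.length_take]; omega

def compute_codeword (s_buffer : String) (la_buffer : String) : Int × Int × String :=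
  let s := s_buffer.toList
  let la := la_buffer.toList
  let r := pvGoA s la (la.take 1) (0, 0, la.take 1)
  (r.1, r.2.1, String.ofList r.2.2)

-- ===== PORT B =====
-- Source B's binary search for the largest k with la_buffer[:k] occurring in s_buffer.
-- lo, hi are Python non-negative ints; (lo+hi+1)//2 on non-negatives is Nat division (exact).
def pvBS (s la : List Char) (lo hi : Nat) : Nat :=
  if lo < hi then
    let mid := (lo + hi + 1) / 2
    if PySem.Chars.isIn (la.take mid) s then pvBS s la mid hi   -- la_buffer[:mid] in s_buffer
    else pvBS s la lo (mid - 1)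
  else lo
termination_by hi - lo
decreasing_by all_goals omega

def compute_codeword_alt (s_buffer : String) (la_buffer : String) : Int × Int × String :=
  let s := s_buffer.toList
  let la := la_buffer.toList
  let c0 := la.take 1  -- la_buffer[0] (Pre_ guarantees la nonempty)
  let m := la.length
  let k := pvBS s la 0 m
  if k = 0 then (0, 0, String.ofList c0)
  else (3 - PySem.Chars.rfind s (la.take k), (k : Int),
        if k < m then String.ofList [la.getD k 'a'] else "")

-- ===== PRECONDITION & SPEC =====
-- Pre_ excludes la_buffer = "" only: there `la_buffer[0]` raises IndexError in both A and B.
def Pre_compute_codeword (s_buffer : String) (la_buffer : String) : Prop := la_buffer ≠ ""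
instance (s_buffer : String) (la_buffer : String) : Decidable (Pre_compute_codeword s_buffer la_buffer) := by unfold Pre_compute_codeword; infer_instance
def pvWitness_compute_codeword : String × String := ("abcab", "abc")

def Spec_compute_codeword (s_buffer : String) (la_buffer : String) (out : Int × Int × String) : Prop := out = compute_codeword_alt s_buffer la_buffer
instance (s_buffer : String) (la_buffer : String) (out : Int × Int × String) : Decidable (Spec_compute_codeword s_buffer la_buffer out) := by unfold Spec_compute_codeword; infer_instance

-- ===== CLAIM (what is proved, stated in full; the proofs are below) =====
def Claim_equal_compute_codeword : Prop := ∀ (s_buffer : String) (la_buffer : String), Dom_compute_codeword s_buffer la_buffer → Pre_compute_codeword s_buffer la_buffer → Spec_compute_codeword s_buffer la_buffer (compute_codeword s_buffer la_buffer)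

-- ===== LEMMAS AND PROOFS =====
theorem pv_rfind_go_eq (s sub : List Char) (j : Nat) :
    PySem.Chars.rfind.go s sub j =
      if ∃ i, i ≤ j ∧ sub <+: s.drop i
      then ((Nat.findGreatest (fun i => sub <+: s.drop i) j : Nat) : Int)
      else -1 := by
  induction j with
  | zero =>
    simp only [PySem.Chars.rfind.go]
    by_cases h : sub <+: s
    · rw [if_pos ((List.isPrefixOf_iff_prefix).mpr h), if_pos ⟨0, le_refl _, by simpa using h⟩]
      simp
    · rw [if_neg (by simpa [List.isPrefixOf_iff_prefix] using h),
          if_neg (by rintro ⟨i, hi, hp⟩; interval_cases i; exact h (by simpa using hp))]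
  | succ j ih =>
    simp only [PySem.Chars.rfind.go]
    by_cases h : sub <+: s.drop (j+1)
    · rw [if_pos ((List.isPrefixOf_iff_prefix).mpr h), if_pos ⟨j+1, le_refl _, h⟩,
          Nat.findGreatest_succ, if_pos h]
    · rw [if_neg (by simpa [List.isPrefixOf_iff_prefix] using h), ih]
      by_cases h2 : ∃ i, i ≤ j ∧ sub <+: s.drop i
      · rw [if_pos h2, if_pos (by obtain ⟨i, hi, hp⟩ := h2; exact ⟨i, by omega, hp⟩),
            Nat.findGreatest_succ, if_neg h]
      · have hne : ¬ ∃ i, i ≤ j + 1 ∧ sub <+: s.drop i := by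
          rintro ⟨i, hi, hp⟩
          rcases Nat.lt_or_ge i (j+1) with hlt | hge
          · exact h2 ⟨i, by omega, hp⟩
          · have hij : i = j+1 := by omega
            exact h (hij ▸ hp)
        rw [if_neg h2, if_neg hne]

theorem pv_infix_iff (sub s : List Char) :
    sub <:+: s ↔ ∃ i, i ≤ s.length ∧ sub <+: s.drop i := by
  constructor
  · rintro ⟨u, v, rfl⟩
    refine ⟨u.length, by simp, ?_⟩
    simp [List.drop_left' (by rfl : u.length = u.length)]
  · rintro ⟨i, hi, hp⟩
    exact hp.isInfix.trans (List.drop_suffix i s).isInfix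

def pvK (s la : List Char) : Nat := Nat.findGreatest (fun k => la.take k <:+: s) la.length

theorem pv_rfind_eq_neg_one (s sub : List Char) (h : ¬ sub <:+: s) :
    PySem.Chars.rfind s sub = -1 := by
  rw [PySem.Chars.rfind, pv_rfind_go_eq, if_neg]
  intro hex
  exact h ((pv_infix_iff sub s).mpr hex)

theorem pv_rfind_of_infix (s sub : List Char) (h : sub <:+: s) :
    PySem.Chars.rfind s sub =
      ((Nat.findGreatest (fun i => sub <+: s.drop i) s.length : Nat) : Int) := by
  rw [PySem.Chars.rfind, pv_rfind_go_eq, if_pos ((pv_infix_iff sub s).mp h)]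

theorem pv_rfind_ne_neg_one (s sub : List Char) (h : sub <:+: s) :
    PySem.Chars.rfind s sub ≠ -1 := by
  rw [pv_rfind_of_infix s sub h]
  omega

theorem pvK_le (s la : List Char) : pvK s la ≤ la.length := Nat.findGreatest_le _

theorem pvGoA_found (s la : List Char) :
    ∀ (d k : Nat) (cw : Int × Int × List Char), la.length - k = d → 1 ≤ k → k ≤ la.length →
    la.take k <:+: s →
    pvGoA s la (la.take k) cw =
      (3 - PySem.Chars.rfind s (la.take (pvK s la)), ((pvK s la : Nat) : Int),
       if pvK s la < la.length then [la.getD (pvK s la) 'a'] else []) := by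
  intro d
  induction d with
  | zero =>
    intro k cw hd hk1 hk2 hinf
    have hkm : k = la.length := by omega
    have hKk : k ≤ pvK s la := Nat.le_findGreatest hk2 hinf
    have hKm : pvK s la ≤ la.length := pvK_le s la
    have hK : pvK s la = k := by omega
    rw [pvGoA]
    simp only [if_neg (pv_rfind_ne_neg_one s _ hinf)]
    rw [dif_neg (by simp [List.length_take]; omega)]
    rw [hK, if_neg (by omega)]
    simp [hkm]
  | succ d ih =>
    intro k cw hd hk1 hk2 hinf
    have hkm : k < la.length := by omega
    have hKk : k ≤ pvK s la := Nat.le_findGreatest hk2 hinf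
    have hKm : pvK s la ≤ la.length := pvK_le s la
    have hlen : (la.take k).length = k := by simp [List.length_take]; omega
    rw [pvGoA]
    simp only [if_neg (pv_rfind_ne_neg_one s _ hinf)]
    rw [dif_pos (by rw [hlen]; omega)]
    rw [hlen]
    by_cases h2 : la.take (k+1) <:+: s
    · exact ih (k+1) _ (by omega) (by omega) (by omega) h2
    · -- the extended prefix is not found: one more unfold returns the carried codeword, and K = k
      have hK : pvK s la = k := by
        by_contra hne
        have hlt : k < pvK s la := by omega
        have hPK : la.take (pvK s la) <:+: s := by
          have h3 := Nat.findGreatest_spec (P := fun j => List.take j la <:+: s) hk2 hinf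
          simpa [pvK] using h3
        exact h2 (((List.take_prefix_take_left (by omega : k+1 ≤ pvK s la)).isInfix).trans hPK)
      rw [pvGoA]
      simp only [pv_rfind_eq_neg_one s (la.take (k + 1)) h2, if_true]
      rw [hK, if_pos hkm]


theorem pvBS_eq_pvK (s la : List Char) :
    ∀ (d lo hi : Nat), hi - lo ≤ d → lo ≤ hi → hi ≤ la.length →
    la.take lo <:+: s → (∀ j, hi < j → j ≤ la.length → ¬ la.take j <:+: s) →
    pvBS s la lo hi = pvK s la := by
  intro d
  induction d with
  | zero =>
    intro lo hi hd hle hm hlo hmax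
    have hlh : lo = hi := by omega
    rw [pvBS, if_neg (by omega)]
    subst hlh
    unfold pvK
    exact (Nat.findGreatest_eq_iff.mpr ⟨hm, fun _ => hlo, fun j hj1 hj2 => hmax j hj1 hj2⟩).symm
  | succ d ih =>
    intro lo hi hd hle hm hlo hmax
    by_cases hlt : lo < hi
    · rw [pvBS, if_pos hlt]
      simp only []
      by_cases hin : PySem.Chars.isIn (la.take ((lo + hi + 1) / 2)) s
      · rw [if_pos hin]
        exact ih ((lo + hi + 1) / 2) hi (by omega) (by omega) hm
          ((PySem.Chars.isIn_iff_infix _ _).mp hin) hmax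
      · rw [if_neg hin]
        refine ih lo ((lo + hi + 1) / 2 - 1) (by omega) (by omega) (by omega) hlo ?_
        intro j hj1 hj2 hjinf
        have hmid : (lo + hi + 1) / 2 ≤ j := by omega
        have : la.take ((lo + hi + 1) / 2) <:+: s :=
          ((List.take_prefix_take_left hmid).isInfix).trans hjinf
        exact hin ((PySem.Chars.isIn_iff_infix _ _).mpr this)
    · rw [pvBS, if_neg hlt]
      have hlh : lo = hi := by omega
      subst hlh
      unfold pvK
      exact (Nat.findGreatest_eq_iff.mpr ⟨hm, fun _ => hlo, fun j hj1 hj2 => hmax j hj1 hj2⟩).symm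

-- ===== VERDICT (by name: the statement is the Claim_ definition above) =====
theorem compute_codeword_spec : Claim_equal_compute_codeword := by
  intro sb lb _dom hpre
  unfold Spec_compute_codeword compute_codeword compute_codeword_alt
  simp only []
  set s := sb.toList with hs
  set la := lb.toList with hla
  have hm : 1 ≤ la.length := by
    have hne : la ≠ [] := by
      intro hn; exact hpre (String.toList_eq_nil_iff.mp (hla ▸ hn))
    have := List.length_pos_of_ne_nil hne
    omega
  have hk : pvBS s la 0 la.length = pvK s la :=
    pvBS_eq_pvK s la la.length 0 la.length (by omega) (by omega) le_rfl
      (by simp) (fun j hj1 hj2 => by omega)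
  rw [hk]
  by_cases hK0 : pvK s la = 0
  · -- no occurrence of la[0] in s: both sides return (0, 0, la[0])
    have hno : ¬ la.take 1 <:+: s := by
      intro h
      have h2 : 1 ≤ pvK s la := Nat.le_findGreatest (P := fun k => la.take k <:+: s) hm h
      omega
    rw [pvGoA]
    simp [pv_rfind_eq_neg_one s (la.take 1) hno, hK0]
  · have hKit := (Nat.findGreatest_eq_iff (P := fun k => la.take k <:+: s)).mp
      (rfl : Nat.findGreatest (fun k => la.take k <:+: s) la.length = pvK s la)
    obtain ⟨hKle', hPK', -⟩ := hKit
    have hKle : pvK s la ≤ la.length := hKle'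
    have hPK : la.take (pvK s la) <:+: s := hPK' hK0
    have h1inf : la.take 1 <:+: s :=
      ((List.take_prefix_take_left (by omega : 1 ≤ pvK s la)).isInfix).trans hPK
    rw [pvGoA_found s la (la.length - 1) 1 (0, 0, la.take 1) rfl le_rfl hm h1inf]
    rw [if_neg hK0]
    by_cases hKm : pvK s la < la.length
    · simp [if_pos hKm]
    · simp [if_neg hKm]
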